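-- pv_equiv track=rewrite | github.com/winnieAI123/model-radar | backend/collectors/leaderboard_scrapers.py | _split_by_rank1
-- ===== SOURCE A (Python) =====
-- def _split_by_rank1(entries: list[dict]) -> list[list[dict]]:
--     categories = []
--     current = []
--     for entry in entries:
--         if entry.get("rank") == 1 and current:
--             categories.append(current)
--             current = []
--         current.append(entry)
--     if current:
--         categories.append(current)
--     return categories
-- ===== SOURCE B (Python) =====
-- def _split_by_rank1(entries: list[dict]) -> list[list[dict]]:
--     if not entries:
--         return []
--     bounds = [0] + [i for i, e in enumerate(entries) if i > 0 and e.get("rank") == 1] + [len(entries)]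
--     return [entries[a:b] for a, b in zip(bounds, bounds[1:])]
-- ===== Notes on version B (the rewrite author's own statement) =====
-- stated objective: alternative
-- what changed: Replaces A's accumulate-as-you-go loop (current chunk + categories accumulator) with a two-phase decomposition: one pass collects the rank==1 boundary indices, then the result is built by slicing the list between consecutive boundaries.
import Mathlib
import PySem

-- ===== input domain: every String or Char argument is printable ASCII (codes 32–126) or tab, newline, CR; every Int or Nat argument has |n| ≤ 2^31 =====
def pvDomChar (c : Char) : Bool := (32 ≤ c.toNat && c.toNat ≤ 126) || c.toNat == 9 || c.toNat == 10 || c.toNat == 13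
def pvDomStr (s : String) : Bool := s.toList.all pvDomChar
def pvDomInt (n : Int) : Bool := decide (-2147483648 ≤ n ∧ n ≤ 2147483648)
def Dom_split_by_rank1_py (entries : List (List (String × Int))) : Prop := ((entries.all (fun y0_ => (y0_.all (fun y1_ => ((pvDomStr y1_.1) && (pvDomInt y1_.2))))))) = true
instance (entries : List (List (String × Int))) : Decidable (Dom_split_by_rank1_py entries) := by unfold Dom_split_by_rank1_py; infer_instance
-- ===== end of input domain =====

-- B replaces A's accumulate-as-you-go grouping loop by a boundary-index table that is then
-- sliced between consecutive boundaries (alternative decomposition, same asymptotic cost).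

-- ===== PORT A =====
def split_by_rank1_py (entries : List (List (String × Int))) : List (List (List (String × Int))) :=
  let s := entries.foldl
    (fun (st : List (List (List (String × Int))) × List (List (String × Int))) entry =>
      let st := if ((PySem.Dict.mk entry).get? "rank" == (some 1 : Option Int)) && !st.2.isEmpty
                then (st.1 ++ [st.2], ([] : List (List (String × Int))))
                else st
      (st.1, st.2 ++ [entry]))
    ([], [])
  if s.2.isEmpty then s.1 else s.1 ++ [s.2]

-- ===== PORT B =====
def split_by_rank1_py_alt (entries : List (List (String × Int))) : List (List (List (String × Int))) :=
  if entries.isEmpty then []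
  else
    let bounds : List Int :=
      0 :: ((PySem.List.enumerate entries 0).filter
              (fun p => decide (0 < p.1) && ((PySem.Dict.mk p.2).get? "rank" == (some 1 : Option Int)))).map (·.1)
        ++ [(entries.length : Int)]
    (bounds.zip bounds.tail).map (fun p => PySem.List.slice entries (some p.1) (some p.2))

-- ===== PRECONDITION & SPEC =====
def Spec_split_by_rank1_py (entries : List (List (String × Int))) (out : List (List (List (String × Int)))) : Prop := out = split_by_rank1_py_alt entries
instance (entries : List (List (String × Int))) (out : List (List (List (String × Int)))) : Decidable (Spec_split_by_rank1_py entries out) := by unfold Spec_split_by_rank1_py; infer_instance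

-- ===== CLAIM (what is proved, stated in full; the proofs are below) =====
def Claim_equal_split_by_rank1_py : Prop := ∀ (entries : List (List (String × Int))), Dom_split_by_rank1_py entries → Spec_split_by_rank1_py entries (split_by_rank1_py entries)

-- ===== LEMMAS AND PROOFS =====

-- boundary test: entry.get("rank") == 1
def pvIsB (e : List (String × Int)) : Bool :=
  (PySem.Dict.mk e).get? "rank" == (some 1 : Option Int)

-- common semantics both ports are reduced to: grouping with an explicit current chunk
def pvChunksFrom (cur : List (List (String × Int))) :
    List (List (String × Int)) → List (List (List (String × Int)))
  | [] => [cur]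
  | x :: tl => if pvIsB x then cur :: pvChunksFrom [x] tl else pvChunksFrom (cur ++ [x]) tl

-- consecutive-bound slicing, written as a recursion on the bound list
def pvZipS (xs : List (List (String × Int))) : Int → List Int → List (List (List (String × Int)))
  | _, [] => []
  | a, b :: t => PySem.List.slice xs (some a) (some b) :: pvZipS xs b t

theorem pvA_loop (rest : List (List (String × Int)))
    (cats : List (List (List (String × Int)))) (cur : List (List (String × Int)))
    (h : cur ≠ []) :
    (let s := rest.foldl
      (fun (st : List (List (List (String × Int))) × List (List (String × Int))) entry =>
        let st := if ((PySem.Dict.mk entry).get? "rank" == (some 1 : Option Int)) && !st.2.isEmpty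
                  then (st.1 ++ [st.2], ([] : List (List (String × Int))))
                  else st
        (st.1, st.2 ++ [entry]))
      (cats, cur)
     if s.2.isEmpty then s.1 else s.1 ++ [s.2]) = cats ++ pvChunksFrom cur rest := by
  induction rest generalizing cats cur with
  | nil => simp [pvChunksFrom, h]
  | cons x tl ih =>
    simp only [List.foldl_cons]
    have hEq : ((PySem.Dict.mk x).get? "rank" == (some 1 : Option Int)) = pvIsB x := rfl
    have hne : cur.isEmpty = false := by simp [h]
    cases hB : pvIsB x with
    | true =>
      simp only [hEq, hB, hne, Bool.not_false, Bool.and_self, if_true, List.nil_append]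
      rw [ih (cats ++ [cur]) [x] (by simp)]
      simp [pvChunksFrom, hB]
    | false =>
      simp only [hEq, hB, Bool.false_and, Bool.false_eq_true, if_false]
      rw [ih cats (cur ++ [x]) (by simp)]
      simp [pvChunksFrom, hB]

theorem pvChunks_skip (pre : List (List (String × Int)))
    (h : ∀ x ∈ pre, pvIsB x = false)
    (cur : List (List (String × Int))) (rest : List (List (String × Int))) :
    pvChunksFrom cur (pre ++ rest) = pvChunksFrom (cur ++ pre) rest := by
  induction pre generalizing cur with
  | nil => simp
  | cons x tl ih =>
    have hx : pvIsB x = false := h x (by simp)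
    simp only [List.cons_append, pvChunksFrom, hx, Bool.false_eq_true, if_false]
    rw [ih (fun y hy => h y (by simp [hy])) (cur ++ [x])]
    simp

theorem pvChunks_all (l : List (List (String × Int)))
    (h : ∀ x ∈ l, pvIsB x = false) (cur : List (List (String × Int))) :
    pvChunksFrom cur l = [cur ++ l] := by
  have := pvChunks_skip l h cur []
  rw [List.append_nil] at this
  rw [this, pvChunksFrom]

theorem pvEnum_shift {α : Type} (xs : List α) (a m : Int) :
    PySem.List.enumerate xs (a + m) = (PySem.List.enumerate xs a).map (fun p => (p.1 + m, p.2)) := by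
  induction xs generalizing a with
  | nil => simp [PySem.List.enumerate_nil]
  | cons x tl ih =>
    rw [PySem.List.enumerate_cons, PySem.List.enumerate_cons]
    have hc : a + m + 1 = (a + 1) + m := by ring
    rw [hc, ih (a + 1)]
    simp

theorem pvZip_map (l : List Int) (a : Int) (xs : List (List (String × Int))) :
    ((a :: l).zip l).map (fun p => PySem.List.slice xs (some p.1) (some p.2)) = pvZipS xs a l := by
  induction l generalizing a with
  | nil => simp [pvZipS]
  | cons b t ih => simp only [List.zip_cons_cons, List.map_cons, pvZipS, ih b]

theorem pvSlice_shift (xs : List (List (String × Int))) (a b m : Int)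
    (ha : 0 ≤ a) (hb : 0 ≤ b) (hm : 0 ≤ m) :
    PySem.List.slice xs (some (a + m)) (some (b + m))
      = PySem.List.slice (xs.drop m.toNat) (some a) (some b) := by
  rw [PySem.List.slice_toNat xs (by omega) (by omega),
      PySem.List.slice_toNat (xs.drop m.toNat) ha hb, List.drop_drop]
  have h1 : (a + m).toNat = m.toNat + a.toNat := by omega
  rw [h1]
  have h2 : (b + m).toNat - (m.toNat + a.toNat) = b.toNat - a.toNat := by omega
  rw [h2]

theorem pvZipS_shift (l : List Int) (a m : Int) (xs : List (List (String × Int)))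
    (ha : 0 ≤ a) (hm : 0 ≤ m) (hl : ∀ b ∈ l, 0 ≤ b) :
    pvZipS xs (a + m) (l.map (· + m)) = pvZipS (xs.drop m.toNat) a l := by
  induction l generalizing a with
  | nil => simp [pvZipS]
  | cons b t ih =>
    have hb : 0 ≤ b := hl b (by simp)
    simp only [List.map_cons, pvZipS]
    rw [pvSlice_shift xs a b m ha hb hm, ih b hb (fun c hc => hl c (by simp [hc]))]

theorem pvZipS_shift0 (l : List Int) (m : Int) (xs : List (List (String × Int)))
    (hm : 0 ≤ m) (hl : ∀ b ∈ l, 0 ≤ b) :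
    pvZipS xs m (l.map (· + m)) = pvZipS (xs.drop m.toNat) 0 l := by
  have h := pvZipS_shift l 0 m xs le_rfl hm hl
  rwa [zero_add] at h

theorem pvFilter_enum_none (pre : List (List (String × Int))) (s : Int)
    (h : ∀ x ∈ pre, pvIsB x = false) :
    (PySem.List.enumerate pre s).filter
      (fun p => decide (0 < p.1) && ((PySem.Dict.mk p.2).get? "rank" == (some 1 : Option Int))) = [] := by
  rw [List.filter_eq_nil_iff]
  intro p hp
  rcases (PySem.List.mem_enumerate_iff _ _ _).1 hp with ⟨k, hk, rfl⟩
  have hx := h (pre[k]) (List.getElem_mem hk)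
  simp [pvIsB] at hx
  simp [hx]

theorem pvFilter_enum_shift (tl : List (List (String × Int))) (m : Int) (hm : 0 ≤ m) :
    (PySem.List.enumerate tl (1 + (1 + m))).filter
        (fun p => decide (0 < p.1) && ((PySem.Dict.mk p.2).get? "rank" == (some 1 : Option Int)))
      = ((PySem.List.enumerate tl 1).filter
          (fun p => decide (0 < p.1) && ((PySem.Dict.mk p.2).get? "rank" == (some 1 : Option Int)))).map
          (fun q => (q.1 + (1 + m), q.2)) := by
  rw [pvEnum_shift tl 1 (1 + m), List.filter_map]
  congr 1
  apply List.filter_congr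
  intro p hp
  rcases (PySem.List.mem_enumerate_iff _ _ _).1 hp with ⟨k, hk, rfl⟩
  have h1 : (0 : Int) < 1 + (k : Int) := by omega
  have h2 : (0 : Int) < 1 + (k : Int) + (1 + m) := by omega
  simp [h1, h2]

theorem pvB_nosplit (e : List (String × Int)) (rest : List (List (String × Int)))
    (h : ∀ x ∈ rest, pvIsB x = false) :
    split_by_rank1_py_alt (e :: rest) = [e :: rest] := by
  simp only [split_by_rank1_py_alt, List.isEmpty_cons, Bool.false_eq_true, if_false]
  rw [PySem.List.enumerate_cons, List.filter_cons_of_neg (by simp), zero_add,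
      pvFilter_enum_none rest 1 h]
  simp only [List.map_nil, List.cons_append, List.nil_append, List.tail_cons]
  rw [pvZip_map]
  simp only [pvZipS, PySem.List.slice_zero_start, PySem.List.slice_to_natCast, List.take_length]

theorem pvB_chunks (n : Nat) (e : List (String × Int)) (rest : List (List (String × Int)))
    (hn : rest.length ≤ n) :
    split_by_rank1_py_alt (e :: rest) = pvChunksFrom [e] rest := by
  induction n generalizing e rest with
  | zero =>
    have hnil : rest = [] := by
      cases rest with
      | nil => rfl
      | cons a b => simp at hn
    subst hnil
    rw [pvB_nosplit e [] (by simp)]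
    rfl
  | succ n ih =>
    have hsplit : rest.takeWhile (fun x => !pvIsB x) ++ rest.dropWhile (fun x => !pvIsB x) = rest :=
      List.takeWhile_append_dropWhile
    have hpre : ∀ x ∈ rest.takeWhile (fun x => !pvIsB x), pvIsB x = false := by
      intro x hx
      simpa using List.mem_takeWhile_imp hx
    cases hsuf : rest.dropWhile (fun x => !pvIsB x) with
    | nil =>
      rw [hsuf, List.append_nil] at hsplit
      have hall : ∀ x ∈ rest, pvIsB x = false := by
        intro x hx
        exact hpre x (by rw [hsplit]; exact hx)
      rw [pvB_nosplit e rest hall, pvChunks_all rest hall [e]]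
      simp
    | cons s tl =>
      have hBs : pvIsB s = true := by
        have hh := List.head?_dropWhile_not (fun x => !pvIsB x) rest
        rw [hsuf] at hh
        simpa using hh
      set pre := rest.takeWhile (fun x => !pvIsB x) with hpredef
      have hrest : rest = pre ++ s :: tl := by rw [← hsplit, hsuf]
      have hlen : tl.length ≤ n := by
        rw [hrest] at hn
        simp [List.length_append] at hn
        omega
      rw [hrest]
      have hkey : split_by_rank1_py_alt (e :: (pre ++ s :: tl))
          = (e :: pre) :: split_by_rank1_py_alt (s :: tl) := by
        have hBs' : ((PySem.Dict.mk s).get? "rank" == (some 1 : Option Int)) = true := hBs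
        simp only [split_by_rank1_py_alt, List.isEmpty_cons, Bool.false_eq_true, if_false]
        rw [PySem.List.enumerate_cons, List.filter_cons_of_neg (by simp), zero_add,
            PySem.List.enumerate_append, List.filter_append, pvFilter_enum_none pre 1 hpre,
            List.nil_append, PySem.List.enumerate_cons,
            List.filter_cons_of_pos
              (by simp only [Bool.and_eq_true, decide_eq_true_eq]; exact ⟨by omega, hBs'⟩),
            show (1 : Int) + (pre.length : Int) + 1 = 1 + (1 + (pre.length : Int)) from by ring,
            pvFilter_enum_shift tl (pre.length : Int) (by omega)]
        conv_rhs => rw [PySem.List.enumerate_cons, List.filter_cons_of_neg (by simp), zero_add]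
        simp only [List.map_cons, List.map_map, List.cons_append, List.tail_cons]
        rw [pvZip_map, pvZip_map]
        simp only [pvZipS]
        congr 1
        · -- first slice is e :: pre
          rw [PySem.List.slice_zero_start,
              show (1 : Int) + (pre.length : Int) = ((pre.length + 1 : Nat) : Int) from by push_cast; ring,
              PySem.List.slice_to_natCast]
          simp [List.take_succ_cons]
        · -- remaining slices shift onto the suffix s :: tl
          have hlist : (((PySem.List.enumerate tl 1).filter
                (fun p => decide (0 < p.1) && ((PySem.Dict.mk p.2).get? "rank" == (some 1 : Option Int)))).map
                ((fun p => p.1) ∘ (fun q => (q.1 + (1 + (pre.length : Int)), q.2))))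
                ++ [((e :: (pre ++ s :: tl)).length : Int)]
              = ((((PySem.List.enumerate tl 1).filter
                    (fun p => decide (0 < p.1) && ((PySem.Dict.mk p.2).get? "rank" == (some 1 : Option Int)))).map
                    (fun p => p.1)) ++ [((s :: tl).length : Int)]).map
                  (· + (1 + (pre.length : Int))) := by
            rw [List.map_append, List.map_map]
            congr 1
            simp only [List.map_cons, List.map_nil, List.length_cons, List.length_append]
            congr 1
            push_cast
            ring
          rw [hlist,
              pvZipS_shift0 _ (1 + (pre.length : Int)) _ (by omega) ?bounds,
              show ((1 : Int) + (pre.length : Int)).toNat = pre.length + 1 from by omega,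
              show (e :: (pre ++ s :: tl)).drop (pre.length + 1) = s :: tl from by
                simp [List.drop_succ_cons]]
          case bounds =>
            intro b hb
            simp only [List.mem_append, List.mem_singleton, List.mem_map] at hb
            rcases hb with ⟨q, hq, rfl⟩ | rfl
            · rcases (PySem.List.mem_enumerate_iff _ _ _).1 (List.mem_of_mem_filter hq) with ⟨k, hk, rfl⟩
              simp
              omega
            · positivity
      rw [hkey, ih s tl hlen, pvChunks_skip pre hpre [e] (s :: tl)]
      simp only [pvChunksFrom, hBs, if_true, List.cons_append, List.nil_append]

theorem pvA_eq (e : List (String × Int)) (rest : List (List (String × Int))) :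
    split_by_rank1_py (e :: rest) = pvChunksFrom [e] rest := by
  have hinit : (fun (st : List (List (List (String × Int))) × List (List (String × Int))) entry =>
        let st := if ((PySem.Dict.mk entry).get? "rank" == (some 1 : Option Int)) && !st.2.isEmpty
                  then (st.1 ++ [st.2], ([] : List (List (String × Int))))
                  else st
        (st.1, st.2 ++ [entry]))
      (([] : List (List (List (String × Int)))), ([] : List (List (String × Int)))) e
      = ([], [e]) := by simp
  have h := pvA_loop rest [] [e] (by simp)
  rw [List.nil_append] at h
  rw [show split_by_rank1_py (e :: rest)
      = (let s := rest.foldl (fun (st : List (List (List (String × Int))) × List (List (String × Int))) entry =>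
        let st := if ((PySem.Dict.mk entry).get? "rank" == (some 1 : Option Int)) && !st.2.isEmpty
                  then (st.1 ++ [st.2], ([] : List (List (String × Int))))
                  else st
        (st.1, st.2 ++ [entry]))
          ((fun (st : List (List (List (String × Int))) × List (List (String × Int))) entry =>
        let st := if ((PySem.Dict.mk entry).get? "rank" == (some 1 : Option Int)) && !st.2.isEmpty
                  then (st.1 ++ [st.2], ([] : List (List (String × Int))))
                  else st
        (st.1, st.2 ++ [entry])) (([] : List (List (List (String × Int)))), ([] : List (List (String × Int)))) e)
         if s.2.isEmpty then s.1 else s.1 ++ [s.2]) from rfl, hinit]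
  exact h

-- ===== VERDICT (by name: the statement is the Claim_ definition above) =====
theorem split_by_rank1_py_spec : Claim_equal_split_by_rank1_py := by
  intro entries _
  unfold Spec_split_by_rank1_py
  cases entries with
  | nil => rfl
  | cons e rest => rw [pvB_chunks rest.length e rest le_rfl, pvA_eq]
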